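-- pv_equiv track=rewrite | github.com/adityajunwal/AI-middleware-python | src/services/utils/common_utils.py | filter_missing_vars
-- ===== SOURCE A (Python) =====
-- def filter_missing_vars(missing_vars, variables_state):
--     # Handle if variables_state is None
--     if variables_state is None:
--         return missing_vars
--
--     # Iterate through keys in missing_vars
--     keys_to_remove = [key for key, value in variables_state.items() if value != "required"]
--
--     # Remove the keys from missing_vars that are in the keys_to_remove list
--     for key in keys_to_remove:
--         if key in missing_vars:
--             del missing_vars[key]
--
--     return missing_vars
-- ===== SOURCE B (Python) =====
-- def filter_missing_vars(missing_vars, variables_state):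
--     if variables_state is None:
--         return missing_vars
--     return {k: v for k, v in missing_vars.items()
--             if variables_state.get(k, "required") == "required"}
-- ===== Notes on version B (the rewrite author's own statement) =====
-- stated objective: simpler
-- what changed: B replaces A's two staged passes (build keys_to_remove from variables_state, then a delete loop mutating missing_vars) by one comprehension over missing_vars that keeps a pair iff variables_state.get(key, 'required') == 'required', returning a new dict instead of mutating in place.
import Mathlib
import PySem

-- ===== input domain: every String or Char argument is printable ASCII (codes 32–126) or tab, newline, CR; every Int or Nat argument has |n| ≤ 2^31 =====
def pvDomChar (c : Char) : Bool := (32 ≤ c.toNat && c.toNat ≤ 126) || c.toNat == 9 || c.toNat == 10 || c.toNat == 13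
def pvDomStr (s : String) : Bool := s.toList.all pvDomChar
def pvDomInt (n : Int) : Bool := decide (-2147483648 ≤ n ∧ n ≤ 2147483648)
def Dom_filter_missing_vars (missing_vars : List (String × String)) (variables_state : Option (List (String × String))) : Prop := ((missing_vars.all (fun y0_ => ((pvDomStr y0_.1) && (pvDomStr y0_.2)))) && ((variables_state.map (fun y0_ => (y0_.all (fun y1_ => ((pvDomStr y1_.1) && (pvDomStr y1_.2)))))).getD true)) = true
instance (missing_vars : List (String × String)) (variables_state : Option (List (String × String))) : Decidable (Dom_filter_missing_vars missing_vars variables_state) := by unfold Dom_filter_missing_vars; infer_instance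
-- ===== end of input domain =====

-- B builds and returns a NEW dict by one comprehension over missing_vars (keep a pair iff
-- variables_state.get(key, "required") == "required"), instead of A's two passes that build
-- keys_to_remove and then delete in place; A mutates missing_vars in place, B does not, and
-- the equivalence proved here is about the returned value only.

-- ===== PORT A =====
def filter_missing_vars (missing_vars : List (String × String)) (variables_state : Option (List (String × String))) : List (String × String) :=
  match variables_state with
  | none => missing_vars
  | some vs =>
      let keysToRemove := (vs.filter (fun p => p.2 != "required")).map Prod.fst
      keysToRemove.foldl (fun acc key =>
        if acc.any (fun p => p.1 == key) then acc.filter (fun p => p.1 != key) else acc) missing_vars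

-- ===== PORT B =====
def filter_missing_vars_alt (missing_vars : List (String × String)) (variables_state : Option (List (String × String))) : List (String × String) :=
  match variables_state with
  | none => missing_vars
  | some vs =>
      missing_vars.filter (fun kv =>
        (((vs.find? (fun p => p.1 == kv.1)).map Prod.snd).getD "required") == "required")

-- ===== PRECONDITION & SPEC =====
-- Pre_ excludes a variables_state association list with duplicate keys: such a list does not
-- represent any Python dict (dict keys are unique), so A's behaviour there is unspecified.
def Pre_filter_missing_vars (missing_vars : List (String × String)) (variables_state : Option (List (String × String))) : Prop :=
  ((variables_state.getD []).map Prod.fst).Nodup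
instance (missing_vars : List (String × String)) (variables_state : Option (List (String × String))) : Decidable (Pre_filter_missing_vars missing_vars variables_state) := by unfold Pre_filter_missing_vars; infer_instance

def pvWitness_filter_missing_vars : (List (String × String)) × (Option (List (String × String))) :=
  ([("a", "x"), ("b", "y")], some [("a", "optional"), ("b", "required")])

def Spec_filter_missing_vars (missing_vars : List (String × String)) (variables_state : Option (List (String × String))) (out : List (String × String)) : Prop := out = filter_missing_vars_alt missing_vars variables_state
instance (missing_vars : List (String × String)) (variables_state : Option (List (String × String))) (out : List (String × String)) : Decidable (Spec_filter_missing_vars missing_vars variables_state out) := by unfold Spec_filter_missing_vars; infer_instance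

-- ===== CLAIM (what is proved, stated in full; the proofs are below) =====
def Claim_equal_filter_missing_vars : Prop := ∀ (missing_vars : List (String × String)) (variables_state : Option (List (String × String))), Dom_filter_missing_vars missing_vars variables_state → Pre_filter_missing_vars missing_vars variables_state → Spec_filter_missing_vars missing_vars variables_state (filter_missing_vars missing_vars variables_state)

-- ===== LEMMAS AND PROOFS =====

-- A's guarded delete step is a plain key-filter (deleting an absent key changes nothing).
theorem pv_stepA_eq (acc : List (String × String)) (key : String) :
    (if acc.any (fun p => p.1 == key) then acc.filter (fun p => p.1 != key) else acc)
      = acc.filter (fun p => p.1 != key) := by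
  split
  · rfl
  · next h =>
    symm
    apply List.filter_eq_self.mpr
    intro p hp
    have hne : ¬ (p.1 == key) = true := fun hq => h (List.any_eq_true.mpr ⟨p, hp, hq⟩)
    simpa using hne

-- Folding key-filters over a key list removes exactly the entries whose key is in the list.
theorem pv_foldl_filter_eq (K : List String) (mv : List (String × String)) :
    K.foldl (fun acc k => acc.filter (fun p => p.1 != k)) mv
      = mv.filter (fun p => !K.contains p.1) := by
  induction K generalizing mv with
  | nil => simp
  | cons k K ih =>
    rw [List.foldl_cons, ih, List.filter_filter]
    apply List.filter_congr
    intro p _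
    simp only [bne, Bool.and_comm, List.contains_eq_mem]
    by_cases h : p.1 = k <;> simp [h]

-- With unique keys, find? locates exactly the stored pair.
theorem pv_find?_of_mem (vs : List (String × String)) (hn : (vs.map Prod.fst).Nodup)
    (k : String) (v : String) (hm : (k, v) ∈ vs) :
    vs.find? (fun p => p.1 == k) = some (k, v) := by
  induction vs with
  | nil => cases hm
  | cons q rest ih =>
    simp only [List.map_cons, List.nodup_cons] at hn
    rcases List.mem_cons.mp hm with h | h
    · subst h; simp [List.find?]
    · rw [List.find?_cons]
      split
      · next heq =>
        exfalso
        apply hn.1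
        have : q.1 = k := by simpa using heq
        rw [this]
        exact List.mem_map.mpr ⟨(k, v), h, rfl⟩
      · exact ih hn.2 h

-- B's .get(key, "required") != "required" agrees with membership in A's keys_to_remove.
theorem pv_cond_eq (vs : List (String × String)) (hn : (vs.map Prod.fst).Nodup) (k : String) :
    ((((vs.find? (fun p => p.1 == k)).map Prod.snd).getD "required") != "required")
      = ((vs.filter (fun p => p.2 != "required")).map Prod.fst).contains k := by
  rw [Bool.eq_iff_iff]
  constructor
  · intro h
    cases hfind : vs.find? (fun p => p.1 == k) with
    | none => rw [hfind] at h; simp at h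
    | some q =>
      rw [hfind] at h
      simp only [Option.map_some, Option.getD_some, bne_iff_ne, ne_eq] at h
      have hq := List.find?_some hfind
      have hqm := List.mem_of_find?_eq_some hfind
      have hq1 : q.1 = k := by simpa using hq
      simp only [List.contains_eq_mem, decide_eq_true_eq, List.mem_map, List.mem_filter]
      exact ⟨q, ⟨hqm, by simpa using h⟩, hq1⟩
  · intro h
    simp only [List.contains_eq_mem, decide_eq_true_eq, List.mem_map, List.mem_filter] at h
    obtain ⟨q, ⟨hqm, hqv⟩, hq1⟩ := h
    have : vs.find? (fun p => p.1 == k) = some (k, q.2) := by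
      apply pv_find?_of_mem vs hn
      rw [← hq1]; exact hqm
    rw [this]
    simpa using hqv

-- ===== VERDICT (by name: the statement is the Claim_ definition above) =====
theorem filter_missing_vars_spec : Claim_equal_filter_missing_vars := by
  intro mv vs? _ hpre
  unfold Spec_filter_missing_vars filter_missing_vars filter_missing_vars_alt
  cases vs? with
  | none => rfl
  | some vs =>
    have hn : (vs.map Prod.fst).Nodup := by
      simpa [Pre_filter_missing_vars] using hpre
    simp only
    rw [show (fun (acc : List (String × String)) (key : String) =>
          if acc.any (fun p => p.1 == key) then acc.filter (fun p => p.1 != key) else acc)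
        = (fun acc key => acc.filter (fun p => p.1 != key)) from
          funext fun acc => funext fun key => pv_stepA_eq acc key]
    rw [pv_foldl_filter_eq]
    apply List.filter_congr
    intro p _
    rw [← pv_cond_eq vs hn p.1]
    by_cases h : (((vs.find? (fun q => q.1 == p.1)).map Prod.snd).getD "required") = "required" <;> simp [h, bne]
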